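-- pv_equiv track=rewrite | github.com/Johannc18/Tile_Traveller | tileTraveller.py | youcantravel
-- ===== SOURCE A (Python) =====
-- def youcantravel(yourBlock):
--     #Clean slate/refresh your option variables
--     allowed = ""
--     option1 = ""
--     option2 = ""
--     option3 = ""
--     option4 = ""
--
--     #Here you find the allowed directions you can travel, by checking walls and exits, then print them.
--     for index,option in enumerate(yourBlock):
--         if option == "e":
--             if index == 0:
--                 option1 += "(W)est "
--                 allowed += "W"
--             elif index == 1:
--                 option2 += "(N)orth "
--                 allowed += "N"
--             elif index == 2:
--                 option3 += "(E)ast "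
--                 allowed += "E"
--             elif index == 3:
--                 option4 += "(S)outh "
--                 allowed += "S"
--     directionoptions = option2 + option3 + option4 + option1 + "."
--     directionoptions = directionoptions.replace(" ", " or ")
--     directionoptions = directionoptions.replace(" or .",".")
--     return directionoptions, allowed
-- ===== SOURCE B (Python) =====
-- def youcantravel(yourBlock):
--     letters = {0: "W", 1: "N", 2: "E", 3: "S"}
--     phrases = {0: "(W)est", 1: "(N)orth", 2: "(E)ast", 3: "(S)outh"}
--     active = [i for i, option in enumerate(yourBlock) if option == "e" and i < 4]
--     allowed = "".join(letters[i] for i in active)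
--     direction = " or ".join(phrases[i] for i in [1, 2, 3, 0] if i in active) + "."
--     return direction, allowed
-- ===== Notes on version B (the rewrite author's own statement) =====
-- stated objective: idiomatic
-- what changed: Replaces the four per-direction accumulator strings and the concatenate-then-double-replace string surgery with one pass collecting the active indices, then '' .join for the letters and ' or '.join over the phrases in order 1,2,3,0 with a final '.'.
import Mathlib
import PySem

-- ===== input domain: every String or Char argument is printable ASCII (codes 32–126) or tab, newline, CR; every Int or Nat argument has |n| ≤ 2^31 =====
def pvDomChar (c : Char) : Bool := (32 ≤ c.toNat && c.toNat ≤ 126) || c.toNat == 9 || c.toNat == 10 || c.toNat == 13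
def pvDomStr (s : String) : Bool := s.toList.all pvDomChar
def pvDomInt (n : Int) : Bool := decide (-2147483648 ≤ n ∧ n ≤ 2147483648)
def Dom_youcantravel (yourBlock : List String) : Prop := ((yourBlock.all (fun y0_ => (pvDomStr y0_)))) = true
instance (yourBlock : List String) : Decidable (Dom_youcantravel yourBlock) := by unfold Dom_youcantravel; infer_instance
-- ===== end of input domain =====

-- B replaces A's four accumulator strings and the concat-plus-double-replace trick
-- by collecting the active indices once and joining letters/phrases with ''.join / ' or '.join (idiomatic).


-- ===== PORT A =====
-- state = (allowed, option1, option2, option3, option4)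
def pvStepA (s : String × String × String × String × String) (p : Int × String) :
    String × String × String × String × String :=
  if p.2 == "e" then
    if p.1 == 0 then (s.1 ++ "W", s.2.1 ++ "(W)est ", s.2.2.1, s.2.2.2.1, s.2.2.2.2)
    else if p.1 == 1 then (s.1 ++ "N", s.2.1, s.2.2.1 ++ "(N)orth ", s.2.2.2.1, s.2.2.2.2)
    else if p.1 == 2 then (s.1 ++ "E", s.2.1, s.2.2.1, s.2.2.2.1 ++ "(E)ast ", s.2.2.2.2)
    else if p.1 == 3 then (s.1 ++ "S", s.2.1, s.2.2.1, s.2.2.2.1, s.2.2.2.2 ++ "(S)outh ")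
    else s
  else s

def youcantravel (yourBlock : List String) : String × String :=
  let st := (PySem.List.enumerate yourBlock 0).foldl pvStepA ("", "", "", "", "")
  let d0 := st.2.2.1 ++ st.2.2.2.1 ++ st.2.2.2.2 ++ st.2.1 ++ "."
  let d1 := PySem.Str.replace d0 " " " or "
  let d2 := PySem.Str.replace d1 " or ." "."
  (d2, st.1)

-- ===== PORT B =====
-- Source B's two literal dicts (keys 0..3 are always present; getD's default is never used)
def pvLetters : PySem.Dict Int String :=
  PySem.Dict.ofList ([((0:Int), "W"), (1, "N"), (2, "E"), (3, "S")] : List (Int × String))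
def pvPhrases : PySem.Dict Int String :=
  PySem.Dict.ofList ([((0:Int), "(W)est"), (1, "(N)orth"), (2, "(E)ast"), (3, "(S)outh")] : List (Int × String))

def youcantravel_alt (yourBlock : List String) : String × String :=
  let active := ((PySem.List.enumerate yourBlock 0).filter
      (fun p => p.2 == "e" && decide (p.1 < 4))).map (·.1)
  let allowed := PySem.Str.join "" (active.map (fun i => PySem.Dict.getD pvLetters i ""))
  let direction := PySem.Str.join " or "
      ((([1, 2, 3, 0] : List Int).filter (fun i => active.contains i)).map
        (fun i => PySem.Dict.getD pvPhrases i "")) ++ "."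
  (direction, allowed)

-- ===== PRECONDITION & SPEC =====
def Spec_youcantravel (yourBlock : List String) (out : String × String) : Prop := out = youcantravel_alt yourBlock
instance (yourBlock : List String) (out : String × String) : Decidable (Spec_youcantravel yourBlock out) := by unfold Spec_youcantravel; infer_instance

-- ===== CLAIM (what is proved, stated in full; the proofs are below) =====
def Claim_equal_youcantravel : Prop := ∀ (yourBlock : List String), Dom_youcantravel yourBlock → Spec_youcantravel yourBlock (youcantravel yourBlock)

-- ===== LEMMAS AND PROOFS =====

-- A's loop body ignores every element whose index is ≥ 4.
theorem pvFoldA_tail (rest : List String) (i : Int) (h : 4 ≤ i)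
    (s : String × String × String × String × String) :
    (PySem.List.enumerate rest i).foldl pvStepA s = s := by
  induction rest generalizing i s with
  | nil => simp [PySem.List.enumerate_nil]
  | cons a t ih =>
    rw [PySem.List.enumerate_cons, List.foldl_cons]
    have hs : pvStepA s (i, a) = s := by
      unfold pvStepA
      have h0 : ((i, a).1 == (0:Int)) = false := by simp; omega
      have h1 : ((i, a).1 == (1:Int)) = false := by simp; omega
      have h2 : ((i, a).1 == (2:Int)) = false := by simp; omega
      have h3 : ((i, a).1 == (3:Int)) = false := by simp; omega
      simp [h0, h1, h2, h3]
    rw [hs]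
    exact ih (i + 1) (by omega) s

-- B's filter keeps nothing of index ≥ 4.
theorem pvFilterB_tail (rest : List String) (i : Int) (h : 4 ≤ i) :
    (PySem.List.enumerate rest i).filter (fun p => p.2 == "e" && decide (p.1 < 4)) = [] := by
  induction rest generalizing i with
  | nil => simp [PySem.List.enumerate_nil]
  | cons a t ih =>
    rw [PySem.List.enumerate_cons, List.filter_cons]
    have : (((i, a).2 == "e") && decide ((i, a).1 < 4)) = false := by
      simp; intro _; omega
    rw [this]
    exact ih (i + 1) (by omega)

-- ===== VERDICT (by name: the statement is the Claim_ definition above) =====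
theorem youcantravel_spec : Claim_equal_youcantravel := by
  intro yb _
  show youcantravel yb = youcantravel_alt yb
  match yb with
  | [] => decide
  | [a] =>
    by_cases ha : a = "e" <;>
      simp_all [youcantravel, youcantravel_alt, pvStepA,
        PySem.List.enumerate_cons, PySem.List.enumerate_nil] <;> decide
  | [a, b] =>
    by_cases ha : a = "e" <;> by_cases hb : b = "e" <;>
      simp_all [youcantravel, youcantravel_alt, pvStepA,
        PySem.List.enumerate_cons, PySem.List.enumerate_nil] <;> decide
  | [a, b, c] =>
    by_cases ha : a = "e" <;> by_cases hb : b = "e" <;> by_cases hc : c = "e" <;>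
      simp_all [youcantravel, youcantravel_alt, pvStepA,
        PySem.List.enumerate_cons, PySem.List.enumerate_nil] <;> decide
  | a :: b :: c :: d :: rest =>
    by_cases ha : a = "e" <;> by_cases hb : b = "e" <;>
      by_cases hc : c = "e" <;> by_cases hd : d = "e" <;>
      simp_all [youcantravel, youcantravel_alt, pvStepA,
        PySem.List.enumerate_cons,
        pvFoldA_tail rest 4 (by omega), pvFilterB_tail rest 4 (by omega)] <;> decide
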